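-- pv_equiv track=rewrite | github.com/USDA-ARS-GBRU/genotype-assembly2snpchip | scripts/enrich_gtcheck_top_hits_with_grin.py | build_output_header
-- ===== SOURCE A (Python) =====
-- INSERT_COLUMNS = [
--     "genotyped_sample",
--     "PLANT NAME",
--     "TAXONOMY",
--     "ORIGIN",
--     "GRIN ID",
--     "GRIN LOOKUP STATUS",
--     "GRIN MATCH METHOD",
-- ]
--
-- def build_output_header(header: list[str], sample_column: str) -> list[str]:
--     out_header: list[str] = []
--     inserted = False
--     for column in header:
--         if column not in out_header:
--             out_header.append(column)
--         if column == sample_column: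
--             for extra in INSERT_COLUMNS:
--                 if extra not in out_header:
--                     out_header.append(extra)
--             inserted = True
--     if not inserted:
--         out_header.extend([column for column in INSERT_COLUMNS if column not in out_header])
--     return out_header
-- ===== SOURCE B (Python) =====
-- INSERT_COLUMNS = [
--     "genotyped_sample",
--     "PLANT NAME",
--     "TAXONOMY",
--     "ORIGIN",
--     "GRIN ID",
--     "GRIN LOOKUP STATUS",
--     "GRIN MATCH METHOD",
-- ]
--
--
-- def build_output_header(header: list[str], sample_column: str) -> list[str]:
--     # Build the whole raw sequence first (splice the extras after the first
--     # occurrence of sample_column, or append them), then dedup in one pass.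
--     if sample_column in header:
--         i = header.index(sample_column)
--         raw = header[: i + 1] + INSERT_COLUMNS + header[i + 1 :]
--     else:
--         raw = header + INSERT_COLUMNS
--     seen = set()
--     out = []
--     for column in raw:
--         if column not in seen:
--             seen.add(column)
--             out.append(column)
--     return out
-- ===== Notes on version B (the rewrite author's own statement) =====
-- stated objective: faster
-- what changed: B separates the work into two phases: it splices INSERT_COLUMNS into the header right after the first occurrence of sample_column (or appends them if absent) and then runs a single first-occurrence deduplication pass with a seen-set, instead of A's interleaved loop that dedups, inserts and keeps an 'inserted' flag with a fallback extend.
import Mathlib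
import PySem

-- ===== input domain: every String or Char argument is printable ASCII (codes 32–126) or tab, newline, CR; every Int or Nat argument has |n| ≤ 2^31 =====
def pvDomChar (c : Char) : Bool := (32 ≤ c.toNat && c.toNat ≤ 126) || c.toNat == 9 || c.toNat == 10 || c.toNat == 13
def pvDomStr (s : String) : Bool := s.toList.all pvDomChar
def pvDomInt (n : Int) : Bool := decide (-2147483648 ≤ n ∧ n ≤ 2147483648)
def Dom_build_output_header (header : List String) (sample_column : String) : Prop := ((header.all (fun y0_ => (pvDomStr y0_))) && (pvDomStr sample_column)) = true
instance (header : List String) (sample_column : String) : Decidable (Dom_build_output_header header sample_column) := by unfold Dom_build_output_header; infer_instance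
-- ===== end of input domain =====

-- B rebuilds the header as splice-then-single-dedup-pass instead of A's interleaved insert/dedup loop (objective: alternative decomposition).
-- ===== PORT A =====
def INSERT_COLUMNS : List String :=
  ["genotyped_sample", "PLANT NAME", "TAXONOMY", "ORIGIN", "GRIN ID",
   "GRIN LOOKUP STATUS", "GRIN MATCH METHOD"]

-- A: interleaved loop — dedup-append each column, and right after the first
-- sample_column occurrence dedup-append the extras; fallback extend at the end.
def build_output_header (header : List String) (sample_column : String) : List String :=
  let st := header.foldl
    (fun (st : List String × Bool) column =>
      let out := if st.1.contains column then st.1 else st.1 ++ [column]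
      if column == sample_column then
        (INSERT_COLUMNS.foldl
          (fun o extra => if o.contains extra then o else o ++ [extra]) out, true)
      else (out, st.2))
    ([], false)
  if !st.2 then st.1 ++ INSERT_COLUMNS.filter (fun c => !st.1.contains c) else st.1

-- ===== PORT B =====
-- B: splice the extras after the first occurrence of sample_column (or append
-- them), then a single first-occurrence dedup pass with a seen-set.
def build_output_header_alt (header : List String) (sample_column : String) : List String :=
  let raw :=
    match PySem.List.index? header sample_column with
    | some i => header.take (i + 1) ++ INSERT_COLUMNS ++ header.drop (i + 1)
    | none => header ++ INSERT_COLUMNS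
  (raw.foldl
    (fun (st : PySem.Set String × List String) column =>
      if PySem.Set.contains st.1 column then st
      else (PySem.Set.add st.1 column, st.2 ++ [column]))
    (PySem.Set.empty, [])).2

-- ===== PRECONDITION & SPEC =====
def Spec_build_output_header (header : List String) (sample_column : String) (out : List String) : Prop := out = build_output_header_alt header sample_column
instance (header : List String) (sample_column : String) (out : List String) : Decidable (Spec_build_output_header header sample_column out) := by unfold Spec_build_output_header; infer_instance

-- ===== CLAIM (what is proved, stated in full; the proofs are below) =====
def Claim_equal_build_output_header : Prop := ∀ (header : List String) (sample_column : String), Dom_build_output_header header sample_column → Spec_build_output_header header sample_column (build_output_header header sample_column)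

-- ===== LEMMAS AND PROOFS =====

-- dedup-fold: append each element not yet present
def dd (o : List String) (xs : List String) : List String :=
  xs.foldl (fun o c => if o.contains c then o else o ++ [c]) o

theorem dd_cons (o : List String) (c : String) (xs : List String) :
    dd o (c :: xs) = dd (if o.contains c then o else o ++ [c]) xs := rfl

theorem dd_append (o xs ys : List String) : dd o (xs ++ ys) = dd (dd o xs) ys := by
  simp [dd, List.foldl_append]

theorem mem_dd_of_mem {a : String} {o : List String} (xs : List String) (h : a ∈ o) :
    a ∈ dd o xs := by
  induction xs generalizing o with
  | nil => exact h
  | cons c t ih =>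
    rw [dd_cons]
    split
    · exact ih h
    · exact ih (List.mem_append_left _ h)

theorem mem_dd_self {a : String} {xs : List String} (o : List String) (h : a ∈ xs) :
    a ∈ dd o xs := by
  induction xs generalizing o with
  | nil => cases h
  | cons c t ih =>
    rw [dd_cons]
    rcases List.mem_cons.mp h with rfl | h'
    · by_cases hc : o.contains a
      · simp only [hc, if_pos]
        exact mem_dd_of_mem t (by simpa using hc)
      · simp only [hc, if_neg, Bool.false_eq_true, not_false_iff]
        exact mem_dd_of_mem t (by simp)
    · split <;> exact ih _ h'

theorem dd_subset_noop {o xs : List String} (h : ∀ x ∈ xs, x ∈ o) : dd o xs = o := by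
  induction xs with
  | nil => rfl
  | cons c t ih =>
    rw [dd_cons]
    have hc : o.contains c := by simpa using h c (by simp)
    rw [if_pos hc]
    exact ih (fun x hx => h x (by simp [hx]))

theorem dd_filter {xs : List String} (o : List String) (hnd : xs.Nodup) :
    dd o xs = o ++ xs.filter (fun c => !o.contains c) := by
  induction xs generalizing o with
  | nil => simp [dd]
  | cons c t ih =>
    rw [dd_cons, List.filter_cons]
    have hnd' := (List.nodup_cons.mp hnd).2
    have hct : c ∉ t := (List.nodup_cons.mp hnd).1
    by_cases hc : o.contains c
    · simp only [hc, if_pos, Bool.not_true, Bool.false_eq_true, if_neg, not_false_iff]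
      exact ih o hnd'
    · simp only [hc, Bool.false_eq_true, if_neg, not_false_iff, Bool.not_false, if_pos]
      rw [ih _ hnd']
      have : (fun x => !(o ++ [c]).contains x) = fun x => (!o.contains x && !(x == c)) := by
        funext x; by_cases h : x = c <;> simp [h]
      rw [this]
      have : t.filter (fun x => !o.contains x && !(x == c)) = t.filter (fun x => !o.contains x) := by
        apply List.filter_congr
        intro x hx
        have : (x == c) = false := by
          simp only [beq_eq_false_iff_ne, ne_eq]
          rintro rfl; exact hct hx
        simp [this]
      rw [this]
      simp

-- A's loop step
def stepA (sample_column : String) (st : List String × Bool) (column : String) :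
    List String × Bool :=
  let out := if st.1.contains column then st.1 else st.1 ++ [column]
  if column == sample_column then
    (INSERT_COLUMNS.foldl
      (fun o extra => if o.contains extra then o else o ++ [extra]) out, true)
  else (out, st.2)

theorem build_A_eq (header : List String) (sample_column : String) :
    build_output_header header sample_column =
      (let st := header.foldl (stepA sample_column) ([], false)
       if !st.2 then st.1 ++ INSERT_COLUMNS.filter (fun c => !st.1.contains c) else st.1) := rfl

-- A's loop over a segment not containing sample_column: pure dedup, flag kept
theorem foldA_no_sample {sample_column : String} {pre : List String}
    (h : sample_column ∉ pre) (o : List String) (b : Bool) :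
    pre.foldl (stepA sample_column) (o, b) = (dd o pre, b) := by
  induction pre generalizing o with
  | nil => rfl
  | cons c t ih =>
    have hne : (c == sample_column) = false := by
      simp only [beq_eq_false_iff_ne, ne_eq]
      rintro rfl; exact h (by simp)
    simp only [List.foldl_cons, dd_cons]
    rw [show stepA sample_column (o, b) c = (if o.contains c then o else o ++ [c], b) by
      simp [stepA, hne]]
    exact ih (fun hm => h (by simp [hm])) _

-- A's loop after insertion: extras already present, so pure dedup again
theorem foldA_after {sample_column : String} (suf : List String) (o : List String)
    (hins : ∀ x ∈ INSERT_COLUMNS, x ∈ o) :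
    suf.foldl (stepA sample_column) (o, true) = (dd o suf, true) := by
  induction suf generalizing o with
  | nil => rfl
  | cons c t ih =>
    simp only [List.foldl_cons, dd_cons]
    set o' := if o.contains c then o else o ++ [c] with ho'
    have hins' : ∀ x ∈ INSERT_COLUMNS, x ∈ o' := by
      intro x hx
      rw [ho']; split
      · exact hins x hx
      · exact List.mem_append_left _ (hins x hx)
    have hstep : stepA sample_column (o, true) c = (if c == sample_column then dd o' INSERT_COLUMNS else o', true) := by
      simp only [stepA, dd]
      rw [← ho']
      split <;> rfl
    rw [hstep]
    split
    · rw [dd_subset_noop hins']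
      exact ih _ hins'
    · exact ih _ hins'

-- B's fold keeps seen = out, so it is dd [] raw
theorem foldB_eq_dd (raw : List String) :
    ∀ o : List String,
      (raw.foldl
        (fun (st : PySem.Set String × List String) column =>
          if PySem.Set.contains st.1 column then st
          else (PySem.Set.add st.1 column, st.2 ++ [column])) (o, o)) = (dd o raw, dd o raw) := by
  induction raw with
  | nil => intro o; rfl
  | cons c t ih =>
    intro o
    simp only [List.foldl_cons, dd_cons]
    by_cases hc : o.contains c
    · rw [if_pos (by simpa using hc), if_pos hc]
      exact ih o
    · have hm : c ∉ o := by simpa using hc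
      rw [if_neg (by simpa using hm), if_neg hc]
      have : PySem.Set.add o c = o ++ [c] := by
        simp [PySem.Set.add, hm]
      rw [this]
      exact ih (o ++ [c])

theorem build_B_eq (header : List String) (sample_column : String) :
    build_output_header_alt header sample_column =
      dd [] (match PySem.List.index? header sample_column with
             | some i => header.take (i + 1) ++ INSERT_COLUMNS ++ header.drop (i + 1)
             | none => header ++ INSERT_COLUMNS) := by
  unfold build_output_header_alt
  have := foldB_eq_dd (match PySem.List.index? header sample_column with
             | some i => header.take (i + 1) ++ INSERT_COLUMNS ++ header.drop (i + 1)
             | none => header ++ INSERT_COLUMNS) []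
  simp only [PySem.Set.empty] at this ⊢
  rw [this]

theorem insert_nodup : INSERT_COLUMNS.Nodup := by decide

-- ===== VERDICT (by name: the statement is the Claim_ definition above) =====
theorem build_output_header_spec : Claim_equal_build_output_header := by
  intro header sample_column _
  unfold Spec_build_output_header
  rw [build_A_eq, build_B_eq]
  cases hidx : PySem.List.index? header sample_column with
  | none =>
    have hnm : sample_column ∉ header := (PySem.List.index?_eq_none_iff header sample_column).mp hidx
    simp only [foldA_no_sample hnm [] false]
    rw [dd_append, dd_filter (dd [] header) insert_nodup]
    simp
  | some i =>
    obtain ⟨pre, suf, hsplit, hlen, hnotpre⟩ := (PySem.List.index?_eq_some_iff header sample_column i).mp hidx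
    subst hsplit hlen
    have htake : (pre ++ sample_column :: suf).take (pre.length + 1) = pre ++ [sample_column] := by
      simp [List.take_append]
    have hdrop : (pre ++ sample_column :: suf).drop (pre.length + 1) = suf := by
      simp [List.drop_append]
    simp only [htake, hdrop]
    rw [List.foldl_append, foldA_no_sample hnotpre [] false, List.foldl_cons]
    have hstep : stepA sample_column (dd [] pre, false) sample_column =
        (dd (dd (dd [] pre) [sample_column]) INSERT_COLUMNS, true) := by
      simp [stepA, dd]
    rw [hstep]
    rw [foldA_after suf _ (fun x hx => mem_dd_self _ hx)]
    simp only [Bool.not_true, Bool.false_eq_true, if_neg, not_false_iff]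
    rw [dd_append, dd_append, dd_append]
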